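-- pv_equiv track=rewrite | github.com/ufuktepe/Algorithms | l_code/0018_4sum_ii.py | k_count
-- ===== SOURCE A (Python) =====
-- from collections import defaultdict
--
-- def k_count(num_lsts):
--     def sum_count(lsts):
--         freq = {0: 1}
--         for lst in lsts:
--             temp_freq = defaultdict(int)
--             for num in lst:
--                 for total in freq:
--                     temp_freq[total+num] += freq[total]
--             freq = temp_freq
--
--         return freq
--
--     n = len(num_lsts)
--     left_lists = num_lsts[:n // 2]
--     right_lists = num_lsts[n // 2:]
--
--     left_freq = sum_count(left_lists)
--     right_freq = sum_count(right_lists)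
--
--     res = 0
--
--     for total, freq1 in left_freq.items():
--         if -total in right_freq:
--             res += freq1 * right_freq[-total]
--
--     return res
-- ===== SOURCE B (Python) =====
-- def k_count(num_lsts):
--     # Single forward scan: one running frequency map of partial sums; no
--     # meet-in-the-middle split, no second map, no complement-combine loop.
--     freq = {0: 1}
--     for lst in num_lsts:
--         nxt = {}
--         for total, f in freq.items():
--             for num in lst:
--                 key = total + num
--                 nxt[key] = nxt.get(key, 0) + f
--         freq = nxt
--     return freq.get(0, 0)
-- ===== Notes on version B (the rewrite author's own statement) =====
-- stated objective: simpler
-- what changed: Replaces A's meet-in-the-middle scheme (split the lists in two halves, build two partial-sum frequency dicts, combine them by looking up complements) with one forward pass that threads a single running frequency dict over all lists and reads off the count of sum 0 at the end.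
import Mathlib
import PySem

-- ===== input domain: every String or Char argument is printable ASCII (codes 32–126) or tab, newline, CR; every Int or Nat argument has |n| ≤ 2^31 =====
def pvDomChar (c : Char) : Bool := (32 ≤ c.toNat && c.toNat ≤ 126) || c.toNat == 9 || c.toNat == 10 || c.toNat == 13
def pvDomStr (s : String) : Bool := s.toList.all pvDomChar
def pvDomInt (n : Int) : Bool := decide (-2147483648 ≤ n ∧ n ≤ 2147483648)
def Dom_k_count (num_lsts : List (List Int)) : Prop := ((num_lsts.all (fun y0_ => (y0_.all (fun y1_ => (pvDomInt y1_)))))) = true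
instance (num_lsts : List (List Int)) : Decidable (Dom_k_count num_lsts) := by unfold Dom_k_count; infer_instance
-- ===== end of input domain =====

-- B replaces A's meet-in-the-middle scheme (split the lists in two halves, build two
-- partial-sum frequency dicts, combine them by complement lookups) with one forward
-- pass threading a single running frequency dict; objective: simpler.


-- ===== PORT A =====
-- sum_count(lsts): freq = {0: 1}; for lst in lsts: temp_freq = defaultdict(int);
--   for num in lst: for total in freq: temp_freq[total+num] += freq[total]; freq = temp_freq
-- (temp_freq[k] += v on a defaultdict(int) is Dict.modify k 0 (· + v))
def pvSumCount (lsts : List (List Int)) : PySem.Dict Int Int :=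
  lsts.foldl (fun freq lst =>
    lst.foldl (fun temp num =>
      freq.keys.foldl (fun temp total =>
        temp.modify (total + num) 0 (· + freq.getD total 0)) temp)
      PySem.Dict.empty)
    ((PySem.Dict.empty : PySem.Dict Int Int).insert 0 1)

def k_count (num_lsts : List (List Int)) : Int :=
  let n : Int := num_lsts.length
  let left_lists := PySem.List.slice num_lsts none (some (PySem.Int.floordiv n 2))
  let right_lists := PySem.List.slice num_lsts (some (PySem.Int.floordiv n 2)) none
  let left_freq := pvSumCount left_lists
  let right_freq := pvSumCount right_lists
  left_freq.items.foldl (fun res p =>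
    if right_freq.contains (-p.1) then res + p.2 * right_freq.getD (-p.1) 0 else res) 0

-- ===== PORT B =====
-- freq = {0: 1}; for lst in num_lsts: nxt = {};
--   for total, f in freq.items(): for num in lst: nxt[total+num] = nxt.get(total+num, 0) + f
--   freq = nxt; return freq.get(0, 0)
def k_count_alt (num_lsts : List (List Int)) : Int :=
  (num_lsts.foldl (fun freq lst =>
      freq.items.foldl (fun nxt p =>
        lst.foldl (fun nxt num =>
          nxt.insert (p.1 + num) (nxt.getD (p.1 + num) 0 + p.2)) nxt)
        PySem.Dict.empty)
    ((PySem.Dict.empty : PySem.Dict Int Int).insert 0 1)).getD 0 0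

-- ===== PRECONDITION & SPEC =====
def Spec_k_count (num_lsts : List (List Int)) (out : Int) : Prop := out = k_count_alt num_lsts
instance (num_lsts : List (List Int)) (out : Int) : Decidable (Spec_k_count num_lsts out) := by unfold Spec_k_count; infer_instance

-- ===== CLAIM (what is proved, stated in full; the proofs are below) =====
def Claim_equal_k_count : Prop := ∀ (num_lsts : List (List Int)), Dom_k_count num_lsts → Spec_k_count num_lsts (k_count num_lsts)

-- ===== LEMMAS AND PROOFS =====

-- One list's convolution step acting on frequency functions (Int → Int), and the
-- whole forward pass pvF; both ports' dicts represent these functions via getD.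
def pvConvStep (g : Int → Int) (lst : List Int) : Int → Int :=
  fun u => (lst.map (fun num => g (u - num))).sum

def pvF (lsts : List (List Int)) (g : Int → Int) : Int → Int :=
  lsts.foldl (fun g lst => pvConvStep g lst) g

def pvI0 : Int → Int := fun u => if u = 0 then 1 else 0

def pvInit : PySem.Dict Int Int := (PySem.Dict.empty : PySem.Dict Int Int).insert 0 1

-- the per-list step functions of the two ports
def pvStepA (freq : PySem.Dict Int Int) (lst : List Int) : PySem.Dict Int Int :=
  lst.foldl (fun temp num =>
    freq.keys.foldl (fun temp total =>
      temp.modify (total + num) 0 (· + freq.getD total 0)) temp)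
    PySem.Dict.empty

def pvStepB (freq : PySem.Dict Int Int) (lst : List Int) : PySem.Dict Int Int :=
  freq.items.foldl (fun nxt p =>
    lst.foldl (fun nxt num =>
      nxt.insert (p.1 + num) (nxt.getD (p.1 + num) 0 + p.2)) nxt)
    PySem.Dict.empty

theorem pvSumCount_def (lsts : List (List Int)) :
    pvSumCount lsts = lsts.foldl pvStepA pvInit := rfl

theorem k_count_alt_eq (l : List (List Int)) :
    k_count_alt l = (l.foldl pvStepB pvInit).getD 0 0 := rfl

-- a counting fold (insert / defaultdict-increment) adds the matching contributions to getD
theorem pv_foldl_incr_getD {α : Type} (xs : List α) (k : α → Int) (v : α → Int)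
    (d : PySem.Dict Int Int) (t : Int) :
    (xs.foldl (fun d x => d.insert (k x) (d.getD (k x) 0 + v x)) d).getD t 0
      = d.getD t 0 + (xs.map (fun x => if k x = t then v x else 0)).sum := by
  induction xs generalizing d with
  | nil => simp
  | cons x xs ih =>
    rw [List.foldl_cons, ih, PySem.Dict.getD_insert]
    by_cases h : t = k x
    · subst h; simp; ring
    · simp only [List.map_cons, List.sum_cons, if_neg h, if_neg (fun hh : k x = t => h hh.symm)]
      ring

-- a 0/1-filtered sum over a Nodup key list picks out the single matching entry
theorem pv_sum_ite_keys (ks : List Int) (hnd : ks.Nodup) (f : Int → Int) (u : Int) :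
    (ks.map (fun s => if s = u then f s else 0)).sum = if u ∈ ks then f u else 0 := by
  induction ks with
  | nil => simp
  | cons k ks ih =>
    rcases List.nodup_cons.mp hnd with ⟨hk, hnd'⟩
    by_cases h : k = u
    · subst h; simp [ih hnd', hk]
    · simp [h, ih hnd', Ne.symm h]

theorem pv_getD_eq_sum_keys (d : PySem.Dict Int Int) (hnd : d.keys.Nodup) (u : Int) :
    (d.keys.map (fun s => if s = u then d.getD s 0 else 0)).sum = d.getD u 0 := by
  rw [pv_sum_ite_keys d.keys hnd _ u]
  by_cases h : u ∈ d.keys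
  · simp [h]
  · have hc : d.contains u = false := by
      rw [PySem.Dict.contains_eq_decide_mem_keys]; simp [h]
    rw [if_neg h]
    exact (PySem.Dict.getD_of_not_contains d 0 hc).symm

theorem pv_getD_eq_sum_items (d : PySem.Dict Int Int) (hnd : d.keys.Nodup) (u : Int) :
    (d.items.map (fun p => if p.1 = u then p.2 else 0)).sum = d.getD u 0 := by
  rw [PySem.Dict.items_eq_map_keys d hnd 0, List.map_map]
  exact pv_getD_eq_sum_keys d hnd u

theorem pvStepA_fold (freq : PySem.Dict Int Int) (lst : List Int) (d : PySem.Dict Int Int) (t : Int) :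
    (lst.foldl (fun temp num =>
      freq.keys.foldl (fun temp total =>
        temp.modify (total + num) 0 (· + freq.getD total 0)) temp) d).getD t 0
    = d.getD t 0 + (lst.map (fun num =>
        (freq.keys.map (fun total => if total + num = t then freq.getD total 0 else 0)).sum)).sum := by
  induction lst generalizing d with
  | nil => simp
  | cons num lst ih =>
    rw [List.foldl_cons, ih,
      show (List.foldl (fun temp total => temp.modify (total + num) 0 fun x => x + freq.getD total 0) d freq.keys).getD t 0
          = d.getD t 0 + ((freq.keys.map (fun total => if total + num = t then freq.getD total 0 else 0)).sum)
        from pv_foldl_incr_getD freq.keys (fun total => total + num) (fun total => freq.getD total 0) d t]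
    simp; ring

theorem pvStepA_getD (freq : PySem.Dict Int Int) (hnd : freq.keys.Nodup) (lst : List Int) (t : Int) :
    (pvStepA freq lst).getD t 0 = pvConvStep (fun u => freq.getD u 0) lst t := by
  rw [pvStepA, pvStepA_fold, PySem.Dict.getD_empty, pvConvStep]
  simp only [zero_add]
  refine congrArg List.sum (List.map_congr_left fun num _ => ?_)
  have h1 : (fun total : Int => if total + num = t then freq.getD total 0 else 0)
      = (fun total : Int => if total = t - num then freq.getD total 0 else 0) := by
    funext total; by_cases h : total + num = t
    · rw [if_pos h, if_pos (by omega)]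
    · rw [if_neg h, if_neg (by omega)]
  rw [h1, pv_getD_eq_sum_keys freq hnd (t - num)]

-- double sums over lists commute
theorem pv_sum_comm {α β : Type} (l₁ : List α) (l₂ : List β) (f : α → β → Int) :
    (l₁.map (fun a => (l₂.map (f a)).sum)).sum = (l₂.map (fun b => (l₁.map (fun a => f a b)).sum)).sum := by
  induction l₁ with
  | nil => simp
  | cons a l ih => simp [ih]

theorem pvStepB_fold (lst : List Int) (ps : List (Int × Int)) (d : PySem.Dict Int Int) (t : Int) :
    (ps.foldl (fun nxt p =>
      lst.foldl (fun nxt num =>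
        nxt.insert (p.1 + num) (nxt.getD (p.1 + num) 0 + p.2)) nxt) d).getD t 0
    = d.getD t 0 + (ps.map (fun p =>
        (lst.map (fun num => if p.1 + num = t then p.2 else 0)).sum)).sum := by
  induction ps generalizing d with
  | nil => simp
  | cons p ps ih =>
    rw [List.foldl_cons, ih,
      pv_foldl_incr_getD lst (fun num => p.1 + num) (fun _ => p.2) d t]
    simp; ring

theorem pvStepB_getD (freq : PySem.Dict Int Int) (hnd : freq.keys.Nodup) (lst : List Int) (t : Int) :
    (pvStepB freq lst).getD t 0 = pvConvStep (fun u => freq.getD u 0) lst t := by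
  rw [pvStepB, pvStepB_fold, PySem.Dict.getD_empty, pvConvStep]
  simp only [zero_add]
  rw [pv_sum_comm freq.items lst (fun p num => if p.1 + num = t then p.2 else 0)]
  refine congrArg List.sum (List.map_congr_left fun num _ => ?_)
  have h1 : (fun p : Int × Int => if p.1 + num = t then p.2 else 0)
      = (fun p : Int × Int => if p.1 = t - num then p.2 else 0) := by
    funext p; by_cases h : p.1 + num = t
    · rw [if_pos h, if_pos (by omega)]
    · rw [if_neg h, if_neg (by omega)]
  rw [h1]
  simpa using pv_getD_eq_sum_items freq hnd (t - num)

theorem pvStepA_nodup (freq : PySem.Dict Int Int) (lst : List Int) : (pvStepA freq lst).keys.Nodup := by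
  rw [pvStepA]
  generalize hd : (PySem.Dict.empty : PySem.Dict Int Int) = d
  have hnd : d.keys.Nodup := by rw [← hd]; exact PySem.Dict.nodup_keys_empty
  clear hd
  induction lst generalizing d with
  | nil => exact hnd
  | cons num lst ih =>
    rw [List.foldl_cons]
    exact ih _ (PySem.Dict.nodup_keys_foldl_modify_key freq.keys (fun total => total + num) 0
      (fun _ total => (· + freq.getD total 0)) d hnd)

theorem pvStepB_nodup (freq : PySem.Dict Int Int) (lst : List Int) : (pvStepB freq lst).keys.Nodup := by
  rw [pvStepB]
  generalize hd : (PySem.Dict.empty : PySem.Dict Int Int) = d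
  have hnd : d.keys.Nodup := by rw [← hd]; exact PySem.Dict.nodup_keys_empty
  clear hd
  induction freq.items generalizing d with
  | nil => exact hnd
  | cons p ps ih =>
    rw [List.foldl_cons]
    exact ih _ (PySem.Dict.nodup_keys_foldl_insert_key lst (fun num => p.1 + num)
      (fun d num => d.getD (p.1 + num) 0 + p.2) d hnd)

theorem pvF_cons (lst : List Int) (rest : List (List Int)) (g : Int → Int) :
    pvF (lst :: rest) g = pvF rest (pvConvStep g lst) := rfl

theorem pvF_append (L R : List (List Int)) (g : Int → Int) :
    pvF (L ++ R) g = pvF R (pvF L g) := by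
  simp [pvF, List.foldl_append]

theorem pvF_add (lsts : List (List Int)) (g h : Int → Int) (t : Int) :
    pvF lsts (fun u => g u + h u) t = pvF lsts g t + pvF lsts h t := by
  induction lsts generalizing g h with
  | nil => rfl
  | cons lst rest ih =>
    rw [pvF_cons, pvF_cons, pvF_cons]
    have h1 : pvConvStep (fun u => g u + h u) lst
        = fun u => pvConvStep g lst u + pvConvStep h lst u := by
      funext u
      simp [pvConvStep]
    rw [h1, ih]

theorem pvF_smul (lsts : List (List Int)) (c : Int) (g : Int → Int) (t : Int) :
    pvF lsts (fun u => c * g u) t = c * pvF lsts g t := by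
  induction lsts generalizing g with
  | nil => rfl
  | cons lst rest ih =>
    rw [pvF_cons, pvF_cons]
    have h1 : pvConvStep (fun u => c * g u) lst = fun u => c * pvConvStep g lst u := by
      funext u
      simp [pvConvStep, List.sum_map_mul_left]
    rw [h1, ih]

theorem pvF_shift (lsts : List (List Int)) (g : Int → Int) (s t : Int) :
    pvF lsts (fun u => g (u - s)) t = pvF lsts g (t - s) := by
  induction lsts generalizing g t with
  | nil => rfl
  | cons lst rest ih =>
    rw [pvF_cons, pvF_cons]
    have h1 : pvConvStep (fun u => g (u - s)) lst = fun u => pvConvStep g lst (u - s) := by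
      funext u
      simp only [pvConvStep]
      refine congrArg List.sum (List.map_congr_left fun num _ => ?_)
      have h2 : u - num - s = u - s - num := by omega
      rw [h2]
    rw [h1, ih]

theorem pvF_zero (lsts : List (List Int)) (t : Int) : pvF lsts (fun _ => (0 : Int)) t = 0 := by
  have h1 : (fun _ : Int => (0 : Int)) = fun u => (0 : Int) * pvI0 u := by
    funext u; ring
  rw [h1, pvF_smul]; ring

theorem pvF_sum_list (lsts : List (List Int)) (l : List (Int × Int)) (t : Int) :
    pvF lsts (fun u => (l.map (fun p => if p.1 = u then p.2 else 0)).sum) t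
      = (l.map (fun p => p.2 * pvF lsts pvI0 (t - p.1))).sum := by
  induction l with
  | nil => simpa using pvF_zero lsts t
  | cons p l ih =>
    have h1 : (fun u => (((p :: l).map (fun q => if q.1 = u then q.2 else 0))).sum)
        = fun u => (if p.1 = u then p.2 else 0)
            + ((l.map (fun q => if q.1 = u then q.2 else 0))).sum := by
      funext u; simp
    rw [h1, pvF_add, ih]
    have h2 : (fun u => if p.1 = u then p.2 else 0) = fun u => p.2 * pvI0 (u - p.1) := by
      funext u
      by_cases h : p.1 = u
      · subst h; simp [pvI0]
      · rw [if_neg h, pvI0, if_neg (by omega)]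
        ring
    rw [h2, pvF_smul, pvF_shift]
    simp

theorem pv_init_getD (u : Int) : pvInit.getD u 0 = pvI0 u := by
  rw [pvInit, PySem.Dict.getD_insert, pvI0]
  simp [PySem.Dict.getD_empty]

theorem pvF_dict (lsts : List (List Int)) (d : PySem.Dict Int Int) (hnd : d.keys.Nodup) (t : Int) :
    pvF lsts (fun u => d.getD u 0) t = (d.items.map (fun p => p.2 * pvF lsts pvI0 (t - p.1))).sum := by
  have h1 : (fun u => d.getD u 0)
      = fun u => (d.items.map (fun p => if p.1 = u then p.2 else 0)).sum := by
    funext u; rw [pv_getD_eq_sum_items d hnd u]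
  rw [h1, pvF_sum_list]

-- the main invariant: any step with the convolution getD property folds to pvF
theorem pv_fold_invariant (step : PySem.Dict Int Int → List Int → PySem.Dict Int Int)
    (hstep : ∀ freq lst t, freq.keys.Nodup → (step freq lst).getD t 0 = pvConvStep (fun u => freq.getD u 0) lst t)
    (hnod : ∀ freq lst, (step freq lst).keys.Nodup)
    (lsts : List (List Int)) (freq : PySem.Dict Int Int) (hnd : freq.keys.Nodup) (t : Int) :
    (lsts.foldl step freq).getD t 0 = pvF lsts (fun u => freq.getD u 0) t := by
  induction lsts generalizing freq with
  | nil => rfl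
  | cons lst rest ih =>
    rw [List.foldl_cons, ih (step freq lst) (hnod freq lst), pvF_cons]
    have h1 : (fun u => (step freq lst).getD u 0) = pvConvStep (fun u => freq.getD u 0) lst := by
      funext u; exact hstep freq lst u hnd
    rw [h1]

theorem pvInit_nodup : pvInit.keys.Nodup :=
  PySem.Dict.nodup_keys_insert _ _ _ PySem.Dict.nodup_keys_empty

theorem pv_foldl_stepA_nodup' (L : List (List Int)) (d : PySem.Dict Int Int)
    (h : d.keys.Nodup) : (L.foldl pvStepA d).keys.Nodup := by
  induction L generalizing d with
  | nil => exact h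
  | cons lst rest ih =>
    rw [List.foldl_cons]
    exact ih _ (pvStepA_nodup d lst)

theorem pvSumCount_getD (L : List (List Int)) (u : Int) :
    (L.foldl pvStepA pvInit).getD u 0 = pvF L pvI0 u := by
  rw [pv_fold_invariant pvStepA (fun f l t h => pvStepA_getD f h l t) pvStepA_nodup L pvInit pvInit_nodup]
  rw [show (fun u => pvInit.getD u 0) = pvI0 from funext pv_init_getD]

theorem pv_main (l : List (List Int)) : k_count l = k_count_alt l := by
  have hfd : PySem.Int.floordiv (l.length : Int) 2 = ((l.length / 2 : Nat) : Int) := by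
    exact_mod_cast PySem.Int.floordiv_natCast l.length 2
  set m : Nat := l.length / 2 with hm
  have hleft : PySem.List.slice l none (some (PySem.Int.floordiv (l.length : Int) 2)) = l.take m := by
    rw [hfd]; exact PySem.List.slice_to_natCast l m
  have hright : PySem.List.slice l (some (PySem.Int.floordiv (l.length : Int) 2)) none = l.drop m := by
    rw [hfd]; exact PySem.List.slice_from_natCast l m
  have hLR : l.take m ++ l.drop m = l := List.take_append_drop m l
  rw [k_count]
  simp only [hleft, hright]
  set lf := pvSumCount (l.take m) with hlf
  set rf := pvSumCount (l.drop m) with hrf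
  have hrf_getD : ∀ u, rf.getD u 0 = pvF (l.drop m) pvI0 u := by
    intro u; rw [hrf, pvSumCount_def]; exact pvSumCount_getD _ u
  have hlf_nodup : lf.keys.Nodup := by
    rw [hlf, pvSumCount_def]; exact pv_foldl_stepA_nodup' _ pvInit pvInit_nodup
  -- A's combine loop is the plain sum Σ p.2 * rf.getD (-p.1) 0 over lf.items
  have hA : lf.items.foldl (fun res p =>
      if rf.contains (-p.1) then res + p.2 * rf.getD (-p.1) 0 else res) 0
      = (lf.items.map (fun p => p.2 * rf.getD (-p.1) 0)).sum := by
    rw [PySem.List.foldl_congr_mem lf.items _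
        (fun (res : Int) (p : Int × Int) => res + p.2 * rf.getD (-p.1) 0) 0
      (by
        intro acc p _
        by_cases hc : rf.contains (-p.1)
        · rw [if_pos hc]
        · rw [if_neg hc]
          show acc = acc + p.2 * rf.getD (-p.1) 0
          rw [PySem.Dict.getD_of_not_contains rf 0 (by simpa using hc)]
          ring)]
    rw [PySem.List.foldl_add lf.items (fun p : Int × Int => p.2 * rf.getD (-p.1) 0) 0]
    simp
  rw [hA]
  -- B's value is pvF over the whole list; split it at m and expand over lf.items
  rw [k_count_alt_eq,
    pv_fold_invariant pvStepB (fun f lst t h => pvStepB_getD f h lst t)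
      pvStepB_nodup l pvInit pvInit_nodup 0]
  rw [show (fun u => pvInit.getD u 0) = pvI0 from funext pv_init_getD,
    ← hLR, pvF_append]
  have h2 : pvF (l.take m) pvI0 = fun u => lf.getD u 0 := by
    funext u
    rw [hlf, pvSumCount_def, pvSumCount_getD]
  rw [h2, pvF_dict _ lf hlf_nodup 0]
  refine (congrArg List.sum (List.map_congr_left fun p _ => ?_)).symm
  rw [hrf_getD (-p.1), show (0 : Int) - p.1 = -p.1 from by ring]

-- ===== VERDICT (by name: the statement is the Claim_ definition above) =====
theorem k_count_spec : Claim_equal_k_count := by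
  intro num_lsts _
  show k_count num_lsts = k_count_alt num_lsts
  exact pv_main num_lsts
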